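-- pv_equiv track=rewrite | github.com/qcambrel/codewars | 5kyu/csv_columns.py | csv_columns
-- ===== SOURCE A (Python) =====
-- def csv_columns(csv, indices):
-- 	columns = csv.split("\n")
-- 	output = []
-- 	for k in range(len(columns)):
-- 		column = columns[k].split(",")
-- 		values = []
-- 		for n in range(len(column)):
-- 			if n in indices:
-- 				values.append(str(column[n]))
-- 		if values:
-- 			output.append(values)
-- 	if output:
-- 		for k in range(len(output)):
-- 			output[k] = (",").join(output[k])
-- 		return ("\n").join(output)
-- 	else:
-- 		return ""
-- ===== SOURCE B (Python) =====
-- def csv_columns(csv, indices):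
--     wanted = sorted(set(i for i in indices if i >= 0))
--     rows = []
--     for line in csv.split("\n"):
--         cols = line.split(",")
--         vals = [cols[i] for i in wanted if i < len(cols)]
--         if vals:
--             rows.append(",".join(vals))
--     return "\n".join(rows)
-- ===== Notes on version B (the rewrite author's own statement) =====
-- stated objective: simpler
-- what changed: B precomputes the sorted deduplicated non-negative index set once and indexes directly into each split row (comprehension, joining as it goes), instead of A's per-row scan over every column position with an 'n in indices' membership test and a second pass that rejoins the collected lists.
import Mathlib
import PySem

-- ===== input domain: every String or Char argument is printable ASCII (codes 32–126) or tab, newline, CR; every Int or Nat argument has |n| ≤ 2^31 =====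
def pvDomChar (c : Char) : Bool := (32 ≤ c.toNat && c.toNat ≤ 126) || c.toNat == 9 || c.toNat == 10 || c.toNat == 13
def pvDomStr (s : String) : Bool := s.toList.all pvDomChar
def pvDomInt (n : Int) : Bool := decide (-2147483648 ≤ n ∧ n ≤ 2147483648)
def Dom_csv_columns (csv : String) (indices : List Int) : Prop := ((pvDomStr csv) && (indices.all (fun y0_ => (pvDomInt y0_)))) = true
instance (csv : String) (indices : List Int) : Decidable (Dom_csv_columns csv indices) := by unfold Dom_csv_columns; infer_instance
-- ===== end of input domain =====

-- B replaces A's per-row scan of every column position (membership test per position, plus a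
-- second rejoin pass) by one precomputed sorted deduplicated non-negative index list that is
-- indexed directly into each row, joining rows as it goes; objective: simpler.

-- ===== PORT A =====
def csv_columns (csv : String) (indices : List Int) : String :=
  let columns := (PySem.Str.split? csv "\n").getD []
  let output : List (List String) := columns.foldl (fun output col =>
    let column := (PySem.Str.split? col ",").getD []
    let values : List String := (PySem.List.pyRange 0 (column.length : Int) 1).foldl
      (fun values n => if n ∈ indices then values ++ [PySem.List.pyGetD column n ""] else values) []
      -- index n of range(len(column)) is always in range, so pyGetD is exact here
    if values = [] then output else output ++ [values]
  ) []
  if output = [] then ""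
  else PySem.Str.join "\n" (output.map (fun v => PySem.Str.join "," v))

-- ===== PORT B =====
def csv_columns_alt (csv : String) (indices : List Int) : String :=
  let wanted := PySem.List.sorted (PySem.Set.ofList (indices.filter (fun i => decide (0 ≤ i)))) (fun x => x) false
  let rows : List String := ((PySem.Str.split? csv "\n").getD []).foldl (fun rows line =>
    let cols := (PySem.Str.split? line ",").getD []
    let vals := (wanted.filter (fun i => decide (i < (cols.length : Int)))).map
      (fun i => PySem.List.pyGetD cols i "")
      -- every i in wanted is ≥ 0 and the filter keeps i < len(cols), so pyGetD is exact here
    if vals = [] then rows else rows ++ [PySem.Str.join "," vals]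
  ) []
  PySem.Str.join "\n" rows

-- ===== PRECONDITION & SPEC =====
def Spec_csv_columns (csv : String) (indices : List Int) (out : String) : Prop := out = csv_columns_alt csv indices
instance (csv : String) (indices : List Int) (out : String) : Decidable (Spec_csv_columns csv indices out) := by unfold Spec_csv_columns; infer_instance

-- ===== CLAIM (what is proved, stated in full; the proofs are below) =====
def Claim_equal_csv_columns : Prop := ∀ (csv : String) (indices : List Int), Dom_csv_columns csv indices → Spec_csv_columns csv indices (csv_columns csv indices)

-- ===== LEMMAS AND PROOFS =====

-- A's inner scan over range(len(column)) keeping positions in `indices` equals B's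
-- sorted-deduplicated non-negative index list restricted to in-range positions.
lemma rowvals_eq (indices : List Int) (column : List String) :
    (PySem.List.pyRange 0 (column.length : Int) 1).foldl
      (fun values n => if n ∈ indices then values ++ [PySem.List.pyGetD column n ""] else values) ([] : List String)
    = ((PySem.List.sorted (PySem.Set.ofList (indices.filter (fun i => decide (0 ≤ i)))) (fun x => x) false).filter
        (fun i => decide (i < (column.length : Int)))).map (fun i => PySem.List.pyGetD column i "") := by
  rw [PySem.List.foldl_append_ite (p := fun n => n ∈ indices) (f := fun n => PySem.List.pyGetD column n "")]
  rw [List.nil_append]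
  congr 1
  have h1 : ((PySem.List.pyRange 0 (column.length : Int) 1).filter (fun n => decide (n ∈ indices))).Pairwise (· < ·) :=
    (PySem.List.pairwise_lt_pyRange_one 0 (column.length : Int)).filter _
  have h2 : (((PySem.List.sorted (PySem.Set.ofList (indices.filter (fun i => decide (0 ≤ i)))) (fun x => x) false).filter
      (fun i => decide (i < (column.length : Int))))).Pairwise (· < ·) :=
    (PySem.List.sorted_ofList_pairwise_lt _).filter _
  refine List.Perm.eq_of_pairwise (fun a b _ _ hab hba => absurd hab (not_lt.mpr hba.le)) h1 h2 ?_
  refine (List.perm_ext_iff_of_nodup (h1.imp ne_of_lt) (h2.imp ne_of_lt)).mpr ?_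
  intro x
  simp only [List.mem_filter, PySem.List.mem_pyRange_one, PySem.List.mem_sorted,
    PySem.Set.mem_ofList, decide_eq_true_eq]
  tauto

-- The outer loops agree: B's row accumulator is always A's accumulator mapped through join ",".
lemma outer_eq (indices : List Int) (cs : List String) (out : List (List String)) :
    cs.foldl (fun rows line =>
        let cols := (PySem.Str.split? line ",").getD []
        let vals := ((PySem.List.sorted (PySem.Set.ofList (indices.filter (fun i => decide (0 ≤ i)))) (fun x => x) false).filter
            (fun i => decide (i < (cols.length : Int)))).map (fun i => PySem.List.pyGetD cols i "")
        if vals = [] then rows else rows ++ [PySem.Str.join "," vals])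
      (out.map (fun v => PySem.Str.join "," v))
    = (cs.foldl (fun output col =>
        let column := (PySem.Str.split? col ",").getD []
        let values : List String := (PySem.List.pyRange 0 (column.length : Int) 1).foldl
          (fun values n => if n ∈ indices then values ++ [PySem.List.pyGetD column n ""] else values) []
        if values = [] then output else output ++ [values]) out).map (fun v => PySem.Str.join "," v) := by
  induction cs generalizing out with
  | nil => rfl
  | cons c cs ih =>
    simp only [List.foldl_cons]
    rw [← ih]
    congr 1
    rw [← rowvals_eq indices ((PySem.Str.split? c ",").getD [])]
    set values := (PySem.List.pyRange 0 (((PySem.Str.split? c ",").getD []).length : Int) 1).foldl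
      (fun values n => if n ∈ indices then values ++ [PySem.List.pyGetD ((PySem.Str.split? c ",").getD []) n ""] else values)
      ([] : List String) with hv
    by_cases h : values = []
    · simp [h]
    · simp [h]

-- ===== VERDICT (by name: the statement is the Claim_ definition above) =====
theorem csv_columns_spec : Claim_equal_csv_columns := by
  intro csv indices _
  unfold Spec_csv_columns csv_columns csv_columns_alt
  dsimp only
  have := outer_eq indices ((PySem.Str.split? csv "\n").getD []) []
  simp only [List.map_nil] at this
  rw [this]
  set output := ((PySem.Str.split? csv "\n").getD []).foldl _ ([] : List (List String))
  by_cases h : output = []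
  · simp [h]
    rfl
  ·simp [h]
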